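-- pv_equiv track=rewrite | github.com/antmarakis/vocab_size_compat | bible/common_lines.py | del_keys
-- ===== SOURCE A (Python) =====
-- def del_keys(d, l, to_keep=True):
--     """Delete excess keys"""
--     for k in list(d.keys()):
--         if to_keep:
--             if k not in l:
--                 del d[k]
--         else:
--             if k in l:
--                 del d[k]
--     return d
-- ===== SOURCE B (Python) =====
-- def del_keys(d, l, to_keep=True):
--     """Delete excess keys"""
--     keep = {k: v for k, v in d.items() if (k in l) == to_keep}
--     d.clear()
--     d.update(keep)
--     return d
-- ===== Notes on version B (the rewrite author's own statement) =====
-- stated objective: simpler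
-- what changed: Replaces the snapshot-keys-then-delete-unwanted loop with a single filter that rebuilds the kept entries (dict comprehension + clear/update), unifying both to_keep branches into one predicate.
import Mathlib
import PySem

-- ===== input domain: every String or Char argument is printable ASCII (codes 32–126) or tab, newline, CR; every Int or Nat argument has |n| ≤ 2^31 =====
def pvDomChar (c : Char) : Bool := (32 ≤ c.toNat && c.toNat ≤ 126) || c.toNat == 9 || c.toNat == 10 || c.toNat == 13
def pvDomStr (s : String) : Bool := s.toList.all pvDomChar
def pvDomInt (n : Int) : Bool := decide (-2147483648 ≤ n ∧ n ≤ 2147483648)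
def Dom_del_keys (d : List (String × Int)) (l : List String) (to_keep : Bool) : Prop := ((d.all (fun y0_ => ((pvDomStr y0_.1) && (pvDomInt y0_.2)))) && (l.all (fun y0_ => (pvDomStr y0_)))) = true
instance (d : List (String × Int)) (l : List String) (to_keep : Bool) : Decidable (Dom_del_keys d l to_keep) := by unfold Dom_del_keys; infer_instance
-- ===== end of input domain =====

-- B rebuilds the kept entries with one filter instead of A's delete-the-unwanted in-place loop (objective: simpler).
-- Both Pythons mutate d in place identically (B via clear+update); the theorems are about the returned mapping.

-- ===== PORT A =====
-- for k in list(d.keys()): if to_keep: if k not in l: del d[k]  else: if k in l: del d[k]; return d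
def del_keys (d : List (String × Int)) (l : List String) (to_keep : Bool) : List (String × Int) :=
  let d0 := PySem.Dict.ofList d
  (d0.keys.foldl (fun dd k =>
      if to_keep then
        (if !(l.contains k) then dd.erase k else dd)
      else
        (if l.contains k then dd.erase k else dd)) d0).items

-- ===== PORT B =====
-- keep = {k: v for k, v in d.items() if (k in l) == to_keep}; d.clear(); d.update(keep); return d
def del_keys_alt (d : List (String × Int)) (l : List String) (to_keep : Bool) : List (String × Int) :=
  let d0 := PySem.Dict.ofList d
  d0.items.filter (fun p => l.contains p.1 == to_keep)

-- ===== PRECONDITION & SPEC =====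
def Spec_del_keys (d : List (String × Int)) (l : List String) (to_keep : Bool) (out : List (String × Int)) : Prop := out = del_keys_alt d l to_keep
instance (d : List (String × Int)) (l : List String) (to_keep : Bool) (out : List (String × Int)) : Decidable (Spec_del_keys d l to_keep out) := by unfold Spec_del_keys; infer_instance

-- ===== CLAIM (what is proved, stated in full; the proofs are below) =====
def Claim_equal_del_keys : Prop := ∀ (d : List (String × Int)) (l : List String) (to_keep : Bool), Dom_del_keys d l to_keep → Spec_del_keys d l to_keep (del_keys d l to_keep)

-- ===== LEMMAS AND PROOFS =====

-- erasing a key filters its entry out of the items list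
theorem items_erase (dd : PySem.Dict String Int) (k : String) :
    (dd.erase k).items = dd.items.filter (fun p => !(p.1 == k)) := by
  cases dd with | mk items => simp [PySem.Dict.erase]

-- a delete-if-pred loop over a key list is one filter of the items
theorem foldl_erase_filter (pred : String → Bool) (ks : List String) (dd : PySem.Dict String Int) :
    (ks.foldl (fun dd k => if pred k then dd.erase k else dd) dd).items
      = dd.items.filter (fun p => !(ks.contains p.1 && pred p.1)) := by
  induction ks generalizing dd with
  | nil => simp
  | cons k ks ih =>
    simp only [List.foldl_cons]
    rw [ih]
    by_cases hk : pred k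
    · simp only [hk, if_true, items_erase, List.filter_filter]
      apply List.filter_congr
      intro p _
      by_cases hpk : p.1 = k
      · simp [hpk, hk]
      · simp [hpk]
    · simp only [hk, Bool.false_eq_true, if_false]
      apply List.filter_congr
      intro p _
      by_cases hpk : p.1 = k
      · simp [hpk, hk]
      · simp [hpk]

-- A's two-branch loop body is delete-if-(membership ≠ to_keep)
theorem body_eq (l : List String) (to_keep : Bool) :
    (fun (dd : PySem.Dict String Int) (k : String) =>
        if to_keep then (if !(l.contains k) then dd.erase k else dd)
        else (if l.contains k then dd.erase k else dd))
      = (fun dd k => if !(l.contains k == to_keep) then dd.erase k else dd) := by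
  funext dd k
  cases to_keep <;> cases h : l.contains k <;> simp only [h, Bool.not_true, Bool.not_false, beq_self_eq_true, Bool.true_beq, Bool.false_beq, if_true, if_false, Bool.false_eq_true, Bool.true_eq_false]

theorem del_keys_spec : Claim_equal_del_keys := by
  intro d l to_keep _
  show del_keys d l to_keep = del_keys_alt d l to_keep
  unfold del_keys del_keys_alt
  rw [body_eq, foldl_erase_filter]
  apply List.filter_congr
  intro p hp
  have hmem : p.1 ∈ (PySem.Dict.ofList d).keys := PySem.Dict.mem_keys_of_mem_items _ hp
  simp [hmem]
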